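-- pv_equiv track=rewrite | github.com/thealper2/codewars-solutions | 7-kyu/squad_number_generator.py | generate_number
-- ===== SOURCE A (Python) =====
-- def generate_number(squad, n):
--     if n not in squad:
--         return n
--
--     possible_numbers = []
--     for first_digit in range(1, 10):
--         for second_digit in range(1, 10):
--             if first_digit + second_digit == n:
--                 number = first_digit * 10 + second_digit
--                 possible_numbers.append(number)
--                 if number not in squad:
--                     return number
--
--     return None
-- ===== SOURCE B (Python) =====
-- def generate_number(squad, n):
--     if n not in squad:
--         return n
--     for first_digit in range(1, 10):
--         second_digit = n - first_digit
--         if 1 <= second_digit <= 9: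
--             number = first_digit * 10 + second_digit
--             if number not in squad:
--                 return number
--     return None
-- ===== Notes on version B (the rewrite author's own statement) =====
-- stated objective: simpler
-- what changed: Replaced the 9x9 nested digit search (and the dead possible_numbers accumulator) with a single loop over the first digit that computes second_digit = n - first_digit arithmetically and bound-checks it.
import Mathlib
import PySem

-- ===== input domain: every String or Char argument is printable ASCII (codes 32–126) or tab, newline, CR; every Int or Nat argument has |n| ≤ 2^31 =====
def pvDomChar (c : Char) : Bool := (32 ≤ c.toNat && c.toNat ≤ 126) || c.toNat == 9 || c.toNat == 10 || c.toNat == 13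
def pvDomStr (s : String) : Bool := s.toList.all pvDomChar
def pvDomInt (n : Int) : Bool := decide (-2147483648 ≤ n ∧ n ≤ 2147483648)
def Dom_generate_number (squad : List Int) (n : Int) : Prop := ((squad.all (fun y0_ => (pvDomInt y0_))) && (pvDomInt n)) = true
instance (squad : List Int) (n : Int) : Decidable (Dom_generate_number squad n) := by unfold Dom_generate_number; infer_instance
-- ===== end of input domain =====

-- B replaces A's 9×9 nested search (and its dead possible_numbers accumulator) with a
-- single pass computing second_digit = n - first_digit arithmetically; simpler, same results.

-- ===== PORT A =====
-- inner loop over second_digit; threads the possible_numbers accumulator like A does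
def gnInner (squad : List Int) (n fd : Int) : List Int → List Int → (List Int × Option Int)
  | pn, [] => (pn, none)
  | pn, sd :: rest =>
    if fd + sd = n then
      let number := fd * 10 + sd
      let pn' := pn ++ [number]
      if number ∈ squad then gnInner squad n fd pn' rest
      else (pn', some number)
    else gnInner squad n fd pn rest

-- outer loop over first_digit
def gnOuter (squad : List Int) (n : Int) : List Int → List Int → Option Int
  | _, [] => none
  | pn, fd :: rest =>
    let r := gnInner squad n fd pn (PySem.List.pyRange 1 10 1)
    match r.2 with
    | some x => some x
    | none => gnOuter squad n r.1 rest

def generate_number (squad : List Int) (n : Int) : Option Int :=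
  if n ∉ squad then some n
  else gnOuter squad n [] (PySem.List.pyRange 1 10 1)

-- ===== PORT B =====
def gnAltLoop (squad : List Int) (n : Int) : List Int → Option Int
  | [] => none
  | fd :: rest =>
    let sd := n - fd
    if 1 ≤ sd ∧ sd ≤ 9 then
      let number := fd * 10 + sd
      if number ∉ squad then some number
      else gnAltLoop squad n rest
    else gnAltLoop squad n rest

def generate_number_alt (squad : List Int) (n : Int) : Option Int :=
  if n ∉ squad then some n
  else gnAltLoop squad n (PySem.List.pyRange 1 10 1)

-- ===== PRECONDITION & SPEC =====
def Spec_generate_number (squad : List Int) (n : Int) (out : Option Int) : Prop := out = generate_number_alt squad n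
instance (squad : List Int) (n : Int) (out : Option Int) : Decidable (Spec_generate_number squad n out) := by unfold Spec_generate_number; infer_instance

-- ===== CLAIM (what is proved, stated in full; the proofs are below) =====
def Claim_equal_generate_number : Prop := ∀ (squad : List Int) (n : Int), Dom_generate_number squad n → Spec_generate_number squad n (generate_number squad n)

-- ===== LEMMAS AND PROOFS =====
lemma pyRange_1_10 : PySem.List.pyRange 1 10 1 = [1,2,3,4,5,6,7,8,9] := by rw [PySem.List.pyRange_one]; rfl
-- the inner loop's result: the unique matching second digit, arithmetically
lemma gnInner_snd (squad : List Int) (n fd : Int) (pn : List Int) :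
    (gnInner squad n fd pn (PySem.List.pyRange 1 10 1)).2 =
      if 1 ≤ n - fd ∧ n - fd ≤ 9 then
        (if fd * 10 + (n - fd) ∉ squad then some (fd * 10 + (n - fd)) else none)
      else none := by
  rw [pyRange_1_10]
  by_cases h : 1 ≤ n - fd ∧ n - fd ≤ 9
  · obtain ⟨m, rfl⟩ : ∃ m : Int, n = fd + m := ⟨n - fd, by ring⟩
    have h1 : 1 ≤ m := by omega
    have h2 : m ≤ 9 := by omega
    interval_cases m <;> simp [gnInner, apply_ite]
  · rw [if_neg h]
    simp [gnInner, show fd + 1 ≠ n by omega, show fd + 2 ≠ n by omega,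
      show fd + 3 ≠ n by omega, show fd + 4 ≠ n by omega, show fd + 5 ≠ n by omega,
      show fd + 6 ≠ n by omega, show fd + 7 ≠ n by omega, show fd + 8 ≠ n by omega,
      show fd + 9 ≠ n by omega]

lemma gnOuter_eq_alt (squad : List Int) (n : Int) (l : List Int) (pn : List Int) :
    gnOuter squad n pn l = gnAltLoop squad n l := by
  induction l generalizing pn with
  | nil => rfl
  | cons fd rest ih =>
    simp only [gnOuter, gnAltLoop]
    rw [gnInner_snd]
    by_cases h : 1 ≤ n - fd ∧ n - fd ≤ 9
    · rw [if_pos h, if_pos h]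
      by_cases hc : fd * 10 + (n - fd) ∈ squad
      · simp [hc, ih]
      · simp [hc]
    · rw [if_neg h, if_neg h]
      exact ih _

-- ===== VERDICT (by name: the statement is the Claim_ definition above) =====
theorem generate_number_spec : Claim_equal_generate_number := by
  intro squad n _
  unfold Spec_generate_number generate_number generate_number_alt
  by_cases h : n ∉ squad
  · simp [h]
  · simp [h, gnOuter_eq_alt]
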